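-- pv_equiv track=rewrite | github.com/victoriaVito/leveleditor_feedthebear | minigame_locally/level_toolkit_py/level_toolkit/generator.py | _route_straight_with_bend
-- ===== SOURCE A (Python) =====
-- def _route_straight_with_bend(
--     start: tuple[int, int],
--     end: tuple[int, int],
--     occupied: set[tuple[int, int]],
-- ) -> list[tuple[int, int]]:
--     r, c = start
--     path = [start]
--
--     # Horizontal first then vertical; fallback to vertical then horizontal.
--     attempts = [((0, 1), (1, 0)), ((1, 0), (0, 1))]
--     for _, _ in attempts:
--         path = [start]
--         r, c = start
--
--         while c != end[1]:
--             c += 1 if c < end[1] else -1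
--             nxt = (r, c)
--             if nxt != end and nxt in occupied:
--                 break
--             path.append(nxt)
--         else:
--             while r != end[0]:
--                 r += 1 if r < end[0] else -1
--                 nxt = (r, c)
--                 if nxt != end and nxt in occupied:
--                     break
--                 path.append(nxt)
--             else:
--                 return path
--
--     # Last resort direct path
--     r, c = start
--     path = [start]
--     while r != end[0]:
--         r += 1 if r < end[0] else -1
--         path.append((r, c))
--     while c != end[1]:
--         c += 1 if c < end[1] else -1
--         path.append((r, c))
--     return path
-- ===== SOURCE B (Python) =====
-- def _route_straight_with_bend(
--     start: tuple[int, int],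
--     end: tuple[int, int],
--     occupied: set[tuple[int, int]],
-- ) -> list[tuple[int, int]]:
--     (r0, c0), (r1, c1) = start, end
--     dr = (r1 > r0) - (r1 < r0)
--     dc = (c1 > c0) - (c1 < c0)
--     # Instead of walking the path and probing the set, scan the obstacle set once
--     # and test each obstacle geometrically against the two segments of the
--     # horizontal-first L (the bend corner (r0, c1) belongs to the horizontal leg).
--     blocked = any(
--         cell != end
--         and ((cell[0] == r0 and cell[1] != c0 and min(c0, c1) <= cell[1] <= max(c0, c1))
--              or (cell[1] == c1 and cell[0] != r0 and min(r0, r1) <= cell[0] <= max(r0, r1)))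
--         for cell in occupied
--     )
--     if not blocked:
--         # Horizontal-first L, emitted by closed-form arithmetic progressions.
--         return [(r0, c0 + dc * k) for k in range(abs(c1 - c0) + 1)] + \
--                [(r0 + dr * k, c1) for k in range(1, abs(r1 - r0) + 1)]
--     # Vertical-first L, unconditional (mirrors the task's last-resort route).
--     return [(r0 + dr * k, c0) for k in range(abs(r1 - r0) + 1)] + \
--            [(r1, c0 + dc * k) for k in range(1, abs(c1 - c0) + 1)]
-- ===== Notes on version B (the rewrite author's own statement) =====
-- stated objective: alternative
-- what changed: B inverts the occupancy check: instead of walking the path cell-by-cell and probing the obstacle set, it scans the obstacle set once and tests each obstacle geometrically (interval containment) against the two legs of the horizontal-first L, then emits the chosen path as closed-form arithmetic progressions rather than by stepping loops; A's redundant two-iteration attempts loop disappears.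
import Mathlib
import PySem

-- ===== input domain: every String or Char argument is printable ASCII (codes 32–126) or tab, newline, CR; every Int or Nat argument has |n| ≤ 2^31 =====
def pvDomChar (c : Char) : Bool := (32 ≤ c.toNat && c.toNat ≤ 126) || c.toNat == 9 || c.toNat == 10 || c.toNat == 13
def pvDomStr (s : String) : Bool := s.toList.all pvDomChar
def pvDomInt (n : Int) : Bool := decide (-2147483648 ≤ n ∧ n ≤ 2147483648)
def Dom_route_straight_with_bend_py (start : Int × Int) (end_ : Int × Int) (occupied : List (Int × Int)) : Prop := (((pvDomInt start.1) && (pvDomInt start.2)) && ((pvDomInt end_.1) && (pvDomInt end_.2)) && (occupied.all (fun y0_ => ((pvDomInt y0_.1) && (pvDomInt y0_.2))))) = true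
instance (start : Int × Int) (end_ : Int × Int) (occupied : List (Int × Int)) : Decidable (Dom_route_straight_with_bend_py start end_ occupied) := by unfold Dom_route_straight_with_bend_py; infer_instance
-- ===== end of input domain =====

-- B scans the obstacle set once with a geometric interval test against the two legs of the
-- horizontal-first L and emits the chosen path as closed-form arithmetic progressions,
-- instead of A's walk-and-probe stepping loops with a redundant two-iteration attempts loop.

-- ===== PORT A =====
-- while c != end[1]: step c; break on occupied (unless it is end); else append.
-- Returns none on break, otherwise some (final c, extended path).
def pvAWhileC (end_ : Int × Int) (occupied : List (Int × Int)) (r : Int) (c : Int)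
    (path : List (Int × Int)) : Option (Int × List (Int × Int)) :=
  if h : c = end_.2 then some (c, path)
  else
    let c' := c + (if c < end_.2 then 1 else -1)
    let nxt := (r, c')
    if nxt ≠ end_ ∧ nxt ∈ occupied then none
    else pvAWhileC end_ occupied r c' (path ++ [nxt])
termination_by (end_.2 - c).natAbs
decreasing_by
  split <;> omega

-- while r != end[0]: step r; break on occupied (unless it is end); else append.
def pvAWhileR (end_ : Int × Int) (occupied : List (Int × Int)) (r : Int) (c : Int)
    (path : List (Int × Int)) : Option (List (Int × Int)) :=
  if h : r = end_.1 then some path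
  else
    let r' := r + (if r < end_.1 then 1 else -1)
    let nxt := (r', c)
    if nxt ≠ end_ ∧ nxt ∈ occupied then none
    else pvAWhileR end_ occupied r' c (path ++ [nxt])
termination_by (end_.1 - r).natAbs
decreasing_by
  split <;> omega

-- for _, _ in attempts: run the two while loops; 'return path' on double normal exit.
def pvAAttempts (start end_ : Int × Int) (occupied : List (Int × Int)) :
    List ((Int × Int) × (Int × Int)) → Option (List (Int × Int))
  | [] => none
  | _ :: rest =>
    match pvAWhileC end_ occupied start.1 start.2 [start] with
    | none => pvAAttempts start end_ occupied rest
    | some (c, path) =>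
      match pvAWhileR end_ occupied start.1 c path with
      | none => pvAAttempts start end_ occupied rest
      | some path2 => some path2

-- last resort: while r != end[0]: step r, append (no occupancy check)
def pvALastR (e0 : Int) (r c : Int) (path : List (Int × Int)) : Int × List (Int × Int) :=
  if h : r = e0 then (r, path)
  else
    let r' := r + (if r < e0 then 1 else -1)
    pvALastR e0 r' c (path ++ [(r', c)])
termination_by (e0 - r).natAbs
decreasing_by
  split <;> omega

-- last resort: while c != end[1]: step c, append
def pvALastC (e1 : Int) (r c : Int) (path : List (Int × Int)) : List (Int × Int) :=
  if h : c = e1 then path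
  else
    let c' := c + (if c < e1 then 1 else -1)
    pvALastC e1 r c' (path ++ [(r, c')])
termination_by (e1 - c).natAbs
decreasing_by
  split <;> omega

def route_straight_with_bend_py (start : Int × Int) (end_ : Int × Int)
    (occupied : List (Int × Int)) : List (Int × Int) :=
  match pvAAttempts start end_ occupied [((0, 1), (1, 0)), ((1, 0), (0, 1))] with
  | some path => path
  | none =>
    let (r, path) := pvALastR end_.1 start.1 start.2 [start]
    pvALastC end_.2 r start.2 path

-- ===== PORT B =====
-- (x > y) - (x < y), Python's comparison-difference sign
def pvSgn2 (x y : Int) : Int := (if x > y then 1 else 0) - (if x < y then 1 else 0)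

def route_straight_with_bend_py_alt (start : Int × Int) (end_ : Int × Int)
    (occupied : List (Int × Int)) : List (Int × Int) :=
  if !(occupied.any (fun cell => decide (cell ≠ end_ ∧
    ((cell.1 = start.1 ∧ cell.2 ≠ start.2 ∧ min start.2 end_.2 ≤ cell.2 ∧ cell.2 ≤ max start.2 end_.2)
      ∨ (cell.2 = end_.2 ∧ cell.1 ≠ start.1 ∧ min start.1 end_.1 ≤ cell.1 ∧ cell.1 ≤ max start.1 end_.1))))) then
    ((PySem.List.pyRange 0 (((end_.2 - start.2).natAbs : Int) + 1) 1).map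
      (fun k => (start.1, start.2 + pvSgn2 end_.2 start.2 * k))) ++
    ((PySem.List.pyRange 1 (((end_.1 - start.1).natAbs : Int) + 1) 1).map
      (fun k => (start.1 + pvSgn2 end_.1 start.1 * k, end_.2)))
  else
    ((PySem.List.pyRange 0 (((end_.1 - start.1).natAbs : Int) + 1) 1).map
      (fun k => (start.1 + pvSgn2 end_.1 start.1 * k, start.2))) ++
    ((PySem.List.pyRange 1 (((end_.2 - start.2).natAbs : Int) + 1) 1).map
      (fun k => (end_.1, start.2 + pvSgn2 end_.2 start.2 * k)))

-- ===== PRECONDITION & SPEC =====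
def Spec_route_straight_with_bend_py (start : Int × Int) (end_ : Int × Int) (occupied : List (Int × Int)) (out : List (Int × Int)) : Prop := out = route_straight_with_bend_py_alt start end_ occupied
instance (start : Int × Int) (end_ : Int × Int) (occupied : List (Int × Int)) (out : List (Int × Int)) : Decidable (Spec_route_straight_with_bend_py start end_ occupied out) := by unfold Spec_route_straight_with_bend_py; infer_instance

-- ===== CLAIM (what is proved, stated in full; the proofs are below) =====
def Claim_equal_route_straight_with_bend_py : Prop := ∀ (start : Int × Int) (end_ : Int × Int) (occupied : List (Int × Int)), Dom_route_straight_with_bend_py start end_ occupied → Spec_route_straight_with_bend_py start end_ occupied (route_straight_with_bend_py start end_ occupied)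

-- ===== LEMMAS AND PROOFS =====

-- recursive characterisation of the spans A steps through, mirroring A's stepping
def spanRec (a b : Int) : List Int :=
  if h : a = b then []
  else
    let s : Int := if a < b then 1 else -1
    (a + s) :: spanRec (a + s) b
termination_by (b - a).natAbs
decreasing_by
  split <;> omega

theorem pyRangeNat (n : Nat) :
    PySem.List.pyRange 0 (n : Int) 1 = (List.range n).map (fun k : Nat => (k : Int)) := by
  rw [PySem.List.pyRange_one]
  simp only [sub_zero, Int.toNat_natCast, zero_add]

theorem spanRec_eq_range (a b : Int) :
    spanRec a b = (List.range (b - a).natAbs).map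
      (fun k : Nat => a + ((k : Int) + 1) * (if a < b then 1 else -1)) := by
  have aux : ∀ (n : Nat) (a b : Int), (b - a).natAbs = n →
      spanRec a b = (List.range (b - a).natAbs).map
        (fun k : Nat => a + ((k : Int) + 1) * (if a < b then 1 else -1)) := by
    intro n
    induction n with
    | zero =>
      intro a b h
      have hab : a = b := by omega
      subst hab
      rw [spanRec]
      simp
    | succ m ih =>
      intro a b h
      have hne : a ≠ b := by omega
      rw [spanRec, dif_neg hne]
      by_cases hlt : a < b
      · simp only [hlt, if_true]
        have hn : (b - a).natAbs = (b - (a + 1)).natAbs + 1 := by omega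
        rw [hn, List.range_succ_eq_map, List.map_cons, List.map_map]
        refine congrArg₂ _ (by norm_num) ?_
        rw [ih (a + 1) b (by omega)]
        by_cases h2 : a + 1 < b
        · simp only [h2, if_true]
          apply List.map_congr_left
          intro k _
          simp only [Function.comp_apply, Nat.succ_eq_add_one]
          push_cast
          ring
        · have h0 : (b - (a + 1)).natAbs = 0 := by omega
          simp [h0]
      · simp only [hlt, if_false]
        have hn : (b - a).natAbs = (b - (a + -1)).natAbs + 1 := by omega
        rw [hn, List.range_succ_eq_map, List.map_cons, List.map_map]
        refine congrArg₂ _ (by norm_num) ?_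
        rw [ih (a + -1) b (by omega)]
        by_cases h2 : a + -1 < b
        · have h0 : (b - (a + -1)).natAbs = 0 := by omega
          simp [h0]
        · simp only [h2, if_false]
          apply List.map_congr_left
          intro k _
          simp only [Function.comp_apply, Nat.succ_eq_add_one]
          push_cast
          ring
  exact aux _ a b rfl

-- membership in a span is exactly interval containment minus the start endpoint
theorem mem_spanRec (a b x : Int) :
    x ∈ spanRec a b ↔ x ≠ a ∧ min a b ≤ x ∧ x ≤ max a b := by
  rw [spanRec_eq_range]
  simp only [List.mem_map, List.mem_range]
  constructor
  · rintro ⟨k, hk, rfl⟩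
    by_cases hlt : a < b <;> simp only [hlt, if_true, if_false] <;> omega
  · rintro ⟨hne, h1, h2⟩
    by_cases hlt : a < b
    · refine ⟨(x - a - 1).toNat, by omega, ?_⟩
      simp only [hlt, if_true]
      omega
    · refine ⟨(a - x - 1).toNat, by omega, ?_⟩
      simp only [hlt, if_false]
      omega

-- characterisation of the horizontal while loop of A
theorem awhileC_char (end_ : Int × Int) (occupied : List (Int × Int)) (r : Int) :
    ∀ (c : Int) (path : List (Int × Int)),
      pvAWhileC end_ occupied r c path =
        if ((spanRec c end_.2).map (fun c' => (r, c'))).all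
            (fun cell => cell == end_ || !(occupied.contains cell)) then
          some (end_.2, path ++ (spanRec c end_.2).map (fun c' => (r, c')))
        else none := by
  intro c
  induction hn : (end_.2 - c).natAbs using Nat.strong_induction_on generalizing c with
  | _ n ih =>
    intro path
    by_cases hc : c = end_.2
    · subst hc
      rw [pvAWhileC, dif_pos rfl, spanRec, dif_pos rfl]
      simp
    · rw [pvAWhileC, dif_neg hc, spanRec, dif_neg hc]
      simp only [List.map_cons, List.all_cons]
      set c' := c + (if c < end_.2 then 1 else -1) with hc'
      have hdec : (end_.2 - c').natAbs < n := by
        rw [hc']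
        subst hn
        split <;> omega
      rw [ih _ hdec c' rfl]
      by_cases hb : (r, c') ≠ end_ ∧ (r, c') ∈ occupied
      · rw [if_pos hb]
        have hhead : ((r, c') == end_ || !occupied.contains (r, c')) = false := by
          simp [hb.1, hb.2]
        rw [hhead, Bool.false_and]
        simp
      · rw [if_neg hb]
        have hok : ((r, c') == end_ || !occupied.contains (r, c')) = true := by
          by_cases he : (r, c') = end_ <;> simp [he] at hb ⊢
          exact hb
        simp only [hok, Bool.true_and]
        split <;> simp

theorem awhileR_char (end_ : Int × Int) (occupied : List (Int × Int)) (c : Int) :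
    ∀ (r : Int) (path : List (Int × Int)),
      pvAWhileR end_ occupied r c path =
        if ((spanRec r end_.1).map (fun r' => (r', c))).all
            (fun cell => cell == end_ || !(occupied.contains cell)) then
          some (path ++ (spanRec r end_.1).map (fun r' => (r', c)))
        else none := by
  intro r
  induction hn : (end_.1 - r).natAbs using Nat.strong_induction_on generalizing r with
  | _ n ih =>
    intro path
    by_cases hr : r = end_.1
    · subst hr
      rw [pvAWhileR, dif_pos rfl, spanRec, dif_pos rfl]
      simp
    · rw [pvAWhileR, dif_neg hr, spanRec, dif_neg hr]
      simp only [List.map_cons, List.all_cons]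
      set r' := r + (if r < end_.1 then 1 else -1) with hr'
      have hdec : (end_.1 - r').natAbs < n := by
        rw [hr']
        subst hn
        split <;> omega
      rw [ih _ hdec r' rfl]
      by_cases hb : (r', c) ≠ end_ ∧ (r', c) ∈ occupied
      · rw [if_pos hb]
        have hhead : ((r', c) == end_ || !occupied.contains (r', c)) = false := by
          simp [hb.1, hb.2]
        rw [hhead, Bool.false_and]
        simp
      · rw [if_neg hb]
        have hok : ((r', c) == end_ || !occupied.contains (r', c)) = true := by
          by_cases he : (r', c) = end_ <;> simp [he] at hb ⊢
          exact hb
        simp only [hok, Bool.true_and]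
        split <;> simp

theorem alastR_char (e0 : Int) (c : Int) :
    ∀ (r : Int) (path : List (Int × Int)),
      pvALastR e0 r c path = (e0, path ++ (spanRec r e0).map (fun r' => (r', c))) := by
  intro r
  induction hn : (e0 - r).natAbs using Nat.strong_induction_on generalizing r with
  | _ n ih =>
    intro path
    by_cases hr : r = e0
    · subst hr
      rw [pvALastR, dif_pos rfl, spanRec, dif_pos rfl]
      simp
    · rw [pvALastR, dif_neg hr, spanRec, dif_neg hr]
      set r' := r + (if r < e0 then 1 else -1) with hr'
      have hdec : (e0 - r').natAbs < n := by
        rw [hr']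
        subst hn
        split <;> omega
      rw [ih _ hdec r' rfl]
      rw [hr', List.map_cons, List.append_assoc, List.singleton_append]

theorem alastC_char (e1 : Int) (r : Int) :
    ∀ (c : Int) (path : List (Int × Int)),
      pvALastC e1 r c path = path ++ (spanRec c e1).map (fun c' => (r, c')) := by
  intro c
  induction hn : (e1 - c).natAbs using Nat.strong_induction_on generalizing c with
  | _ n ih =>
    intro path
    by_cases hc : c = e1
    · subst hc
      rw [pvALastC, dif_pos rfl, spanRec, dif_pos rfl]
      simp
    · rw [pvALastC, dif_neg hc, spanRec, dif_neg hc]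
      set c' := c + (if c < e1 then 1 else -1) with hc'
      have hdec : (e1 - c').natAbs < n := by
        rw [hc']
        subst hn
        split <;> omega
      rw [ih _ hdec c' rfl]
      rw [hc', List.map_cons, List.append_assoc, List.singleton_append]

-- B's closed-form leg with the start cell (range from 0) = start cell :: span image
theorem bleg0_eq (a b : Int) (f : Int → Int × Int) :
    (PySem.List.pyRange 0 (((b - a).natAbs : Int) + 1) 1).map
        (fun k => f (a + pvSgn2 b a * k)) =
      f a :: (spanRec a b).map f := by
  have : (((b - a).natAbs : Int) + 1) = (((b - a).natAbs + 1 : Nat) : Int) := by push_cast; ring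
  rw [this, pyRangeNat, List.map_map, List.range_succ_eq_map, List.map_cons, List.map_map,
    spanRec_eq_range, List.map_map]
  refine congrArg₂ _ (by simp) ?_
  apply List.map_congr_left
  intro k hk
  simp only [List.mem_range] at hk
  simp only [Function.comp_apply, Nat.succ_eq_add_one]
  refine congrArg f ?_
  have hab : a ≠ b := by omega
  unfold pvSgn2
  by_cases hlt : a < b
  · simp only [hlt, if_true, show b > a from hlt, show ¬b < a by omega, if_false]
    push_cast
    ring
  · simp only [hlt, if_false, show ¬b > a by omega, show b < a by omega, if_true]
    push_cast
    ring

-- B's closed-form leg without the start cell (range from 1) = span image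
theorem bleg1_eq (a b : Int) (f : Int → Int × Int) :
    (PySem.List.pyRange 1 (((b - a).natAbs : Int) + 1) 1).map
        (fun k => f (a + pvSgn2 b a * k)) =
      (spanRec a b).map f := by
  rw [PySem.List.pyRange_one]
  have : ((((b - a).natAbs : Int) + 1) - 1).toNat = (b - a).natAbs := by omega
  rw [this, List.map_map, spanRec_eq_range, List.map_map]
  apply List.map_congr_left
  intro k hk
  simp only [List.mem_range] at hk
  simp only [Function.comp_apply]
  refine congrArg f ?_
  have hab : a ≠ b := by omega
  unfold pvSgn2
  by_cases hlt : a < b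
  · simp only [hlt, if_true, show b > a from hlt, show ¬b < a by omega, if_false]
    push_cast
    ring
  · simp only [hlt, if_false, show ¬b > a by omega, show b < a by omega, if_true]
    push_cast
    ring

-- B's obstacle scan is false exactly when both legs of the horizontal-first L are clear
theorem blocked_iff (start end_ : Int × Int) (occupied : List (Int × Int)) :
    (occupied.any (fun cell => decide (cell ≠ end_ ∧
      ((cell.1 = start.1 ∧ cell.2 ≠ start.2 ∧ min start.2 end_.2 ≤ cell.2 ∧ cell.2 ≤ max start.2 end_.2)
        ∨ (cell.2 = end_.2 ∧ cell.1 ≠ start.1 ∧ min start.1 end_.1 ≤ cell.1 ∧ cell.1 ≤ max start.1 end_.1)))) = false)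
    ↔ (∀ x ∈ spanRec start.2 end_.2, (start.1, x) = end_ ∨ (start.1, x) ∉ occupied)
      ∧ (∀ x ∈ spanRec start.1 end_.1, (x, end_.2) = end_ ∨ (x, end_.2) ∉ occupied) := by
  simp only [List.any_eq_false, decide_eq_true_eq]
  constructor
  · intro h
    refine ⟨fun x hx => ?_, fun x hx => ?_⟩
    · by_cases he : (start.1, x) = end_
      · exact Or.inl he
      · refine Or.inr fun hmem => h _ hmem ?_
        obtain ⟨h1, h2, h3⟩ := (mem_spanRec _ _ _).1 hx
        exact ⟨he, Or.inl ⟨rfl, h1, h2, h3⟩⟩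
    · by_cases he : (x, end_.2) = end_
      · exact Or.inl he
      · refine Or.inr fun hmem => h _ hmem ?_
        obtain ⟨h1, h2, h3⟩ := (mem_spanRec _ _ _).1 hx
        exact ⟨he, Or.inr ⟨rfl, h1, h2, h3⟩⟩
  · rintro ⟨hH, hV⟩ ⟨a, b⟩ hmem ⟨hne, hd⟩
    rcases hd with ⟨e1, e2, e3, e4⟩ | ⟨e1, e2, e3, e4⟩
    · simp only at e1 e2 e3 e4
      subst e1
      rcases hH b ((mem_spanRec _ _ _).2 ⟨e2, e3, e4⟩) with h | h
      · exact hne h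
      · exact h hmem
    · simp only at e1 e2 e3 e4
      subst e1
      rcases hV a ((mem_spanRec _ _ _).2 ⟨e2, e3, e4⟩) with h | h
      · exact hne h
      · exact h hmem

-- ===== VERDICT (by name: the statement is the Claim_ definition above) =====
theorem route_straight_with_bend_py_spec : Claim_equal_route_straight_with_bend_py := by
  intro start end_ occupied _
  unfold Spec_route_straight_with_bend_py
  unfold route_straight_with_bend_py route_straight_with_bend_py_alt
  rw [bleg0_eq start.2 end_.2 (fun c => (start.1, c)),
    bleg1_eq start.1 end_.1 (fun r => (r, end_.2)),
    bleg0_eq start.1 end_.1 (fun r => (r, start.2)),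
    bleg1_eq start.2 end_.2 (fun c => (end_.1, c))]
  by_cases hH : ∀ x ∈ spanRec start.2 end_.2, (start.1, x) = end_ ∨ (start.1, x) ∉ occupied <;>
    by_cases hV : ∀ x ∈ spanRec start.1 end_.1, (x, end_.2) = end_ ∨ (x, end_.2) ∉ occupied
  · rw [(blocked_iff start end_ occupied).2 ⟨hH, hV⟩]
    simp [pvAAttempts, awhileC_char, awhileR_char, if_pos hH, if_pos hV]
  · have hb : ¬ _ := fun h => hV ((blocked_iff start end_ occupied).1 h).2
    rw [Bool.not_eq_false] at hb
    rw [hb]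
    simp [pvAAttempts, awhileC_char, awhileR_char, alastR_char, alastC_char, if_pos hH,
      if_neg hV]
  · have hb : ¬ _ := fun h => hH ((blocked_iff start end_ occupied).1 h).1
    rw [Bool.not_eq_false] at hb
    rw [hb]
    simp [pvAAttempts, awhileC_char, alastR_char, alastC_char, hH]
  · have hb : ¬ _ := fun h => hH ((blocked_iff start end_ occupied).1 h).1
    rw [Bool.not_eq_false] at hb
    rw [hb]
    simp [pvAAttempts, awhileC_char, alastR_char, alastC_char, hH]
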